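-- pv_equiv track=rewrite | github.com/danapaduraru/Python-Programming | Lab_1/ex_8.py | get_multipliers
-- ===== SOURCE A (Python) =====
-- def get_multipliers(polynomial):
--     # 13x ^ 3 + 5x ^ 2 - 2x - 5 => multipliers = [13,5,2,1]
--     multipliers = []
--     next_x = polynomial.find('x')
--     pos = 0
--     while next_x != -1:
--         multiplier = polynomial[pos:next_x]
--         # clean multiplier
--         last_space = multiplier.rfind(' ')
--         multiplier = multiplier[last_space + 1:]
--         # if we have an "x" without a multiplier in front of it
--         if multiplier == "":
--             multiplier = '1'
--         multipliers.append(multiplier)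
--         # find next multiplier, and if there aren't any left, exit while ( i would be -1 )
--         pos = next_x + 1
--         next_x = polynomial.find('x', next_x + 1)
--     return multipliers
-- ===== SOURCE B (Python) =====
-- def get_multipliers(polynomial):
--     # one pass over the characters: keep the run of non-space chars seen since
--     # the last space or 'x'; on each 'x' emit it (or '1' if empty) and reset.
--     multipliers = []
--     run = ''
--     for c in polynomial:
--         if c == 'x':
--             multipliers.append(run or '1')
--             run = ''
--         elif c == ' ':
--             run = ''
--         else:
--             run += c
--     return multipliers
-- ===== Notes on version B (the rewrite author's own statement) =====
-- stated objective: simpler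
-- what changed: Replaces A's index-based while loop (repeated str.find for the next 'x', slicing out the segment, rfind(' ') cleanup per segment) with a single left-to-right character scan that keeps the current run of non-space characters and emits it (or '1') at each 'x'.
import Mathlib
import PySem

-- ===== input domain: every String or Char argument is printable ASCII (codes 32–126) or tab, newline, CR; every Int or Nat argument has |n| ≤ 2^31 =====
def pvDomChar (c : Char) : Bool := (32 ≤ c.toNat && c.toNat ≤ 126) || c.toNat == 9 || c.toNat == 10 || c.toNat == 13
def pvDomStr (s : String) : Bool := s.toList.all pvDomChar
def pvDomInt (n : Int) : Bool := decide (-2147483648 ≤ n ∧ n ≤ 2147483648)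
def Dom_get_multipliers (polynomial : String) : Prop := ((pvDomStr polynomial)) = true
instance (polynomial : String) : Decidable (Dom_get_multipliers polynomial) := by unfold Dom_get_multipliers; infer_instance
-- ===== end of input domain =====

-- B replaces A's index-based find/rfind/slice while-loop by a single left-to-right
-- character scan with a run accumulator (objective: simpler, one pass).

-- ===== PORT A =====

def getMulLoop (p : String) (fuel : Nat) (ms : List String) (pos next_x : Int) : List String :=
  match fuel with
  | 0 => ms  -- never reached: get_multipliers passes fuel > number of loop iterations (totality guard only)
  | Nat.succ fuel =>
    if next_x = -1 then ms
    else
      let multiplier := PySem.Str.slice p (some pos) (some next_x)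
      let last_space := PySem.Str.rfind multiplier " "
      let multiplier2 := PySem.Str.slice multiplier (some (last_space + 1)) none
      let multiplier3 := if multiplier2 = "" then "1" else multiplier2
      getMulLoop p fuel (ms ++ [multiplier3]) (next_x + 1) (PySem.Str.findFrom p "x" (next_x + 1))

def get_multipliers (polynomial : String) : List String :=
  getMulLoop polynomial (polynomial.toList.length + 1) [] 0 (PySem.Str.find polynomial "x")

-- ===== PORT B =====

def getMulStep (st : List String × String) (c : Char) : List String × String :=
  if c = 'x' then (st.1 ++ [if st.2 = "" then "1" else st.2], "")
  else if c = ' ' then (st.1, "")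
  else (st.1, st.2.push c)

def get_multipliers_alt (polynomial : String) : List String :=
  (polynomial.toList.foldl getMulStep ([], "")).1

-- ===== PRECONDITION & SPEC =====
def Spec_get_multipliers (polynomial : String) (out : List String) : Prop := out = get_multipliers_alt polynomial
instance (polynomial : String) (out : List String) : Decidable (Spec_get_multipliers polynomial out) := by unfold Spec_get_multipliers; infer_instance

-- ===== CLAIM (what is proved, stated in full; the proofs are below) =====
def Claim_equal_get_multipliers : Prop := ∀ (polynomial : String), Dom_get_multipliers polynomial → Spec_get_multipliers polynomial (get_multipliers polynomial)

-- ===== LEMMAS AND PROOFS =====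

theorem single_prefix_drop (l : List Char) (i : Nat) (c : Char) :
    [c] <+: l.drop i ↔ l[i]? = some c := by
  rw [← List.head?_drop]
  constructor
  · rintro ⟨t, ht⟩
    simp [← ht]
  · intro h
    rcases hd : l.drop i with _ | ⟨a, t⟩ <;> simp [hd] at h ⊢
    exact h.symm

theorem go_none (s sub : List Char) (n : Nat) (h : ∀ i ≤ n, ¬ sub <+: s.drop i) :
    PySem.Chars.rfind.go s sub n = -1 := by
  induction n with
  | zero =>
    have := h 0 (le_refl 0)
    simp [PySem.Chars.rfind.go, List.isPrefixOf_iff_prefix]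
    simpa using this
  | succ j ih =>
    have hj := h (j + 1) (le_refl _)
    simp [PySem.Chars.rfind.go, List.isPrefixOf_iff_prefix, hj]
    exact ih (fun i hi => h i (by omega))

theorem go_max (s sub : List Char) (n i : Nat) (hin : i ≤ n) (hp : sub <+: s.drop i)
    (hmax : ∀ j, i < j → j ≤ n → ¬ sub <+: s.drop j) :
    PySem.Chars.rfind.go s sub n = (i : Int) := by
  induction n with
  | zero =>
    interval_cases i
    simpa [PySem.Chars.rfind.go, List.isPrefixOf_iff_prefix] using hp
  | succ j ih =>
    by_cases hc : sub <+: s.drop (j + 1)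
    · have hi : i = j + 1 := by
        by_contra hne
        exact hmax (j + 1) (by omega) (le_refl _) hc
      subst hi
      simp [PySem.Chars.rfind.go, List.isPrefixOf_iff_prefix, hc]
    · have hij : i ≤ j := by
        by_contra hgt
        have : i = j + 1 := by omega
        exact hc (this ▸ hp)
      simp [PySem.Chars.rfind.go, List.isPrefixOf_iff_prefix, hc]
      exact ih hij (fun k hk1 hk2 => hmax k hk1 (by omega))

def cleanupL (u : List Char) : List Char :=
  PySem.Chars.slice u (some (PySem.Chars.rfind u [' '] + 1)) none

theorem cleanup_no_space (u : List Char) (h : (' ' : Char) ∉ u) : cleanupL u = u := by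
  have hrf : PySem.Chars.rfind u [' '] = -1 := by
    apply go_none
    intro i _ hc
    rw [single_prefix_drop] at hc
    exact h (List.mem_of_getElem? hc)
  simp [cleanupL, hrf]

theorem cleanup_last (w b : List Char) (hb : (' ' : Char) ∉ b) :
    cleanupL (w ++ ' ' :: b) = b := by
  have hrf : PySem.Chars.rfind (w ++ ' ' :: b) [' '] = (w.length : Int) := by
    apply go_max _ _ _ _ (by simp)
    · rw [single_prefix_drop]
      simp
    · intro j hj1 _ hc
      rw [single_prefix_drop] at hc
      rw [List.getElem?_append_right (by omega)] at hc
      obtain ⟨m, hm⟩ : ∃ m, j - w.length = m + 1 := ⟨j - w.length - 1, by omega⟩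
      rw [hm, List.getElem?_cons_succ] at hc
      exact hb (List.mem_of_getElem? hc)
  have h01 : ((w.length : Int) + 1) = ((w.length + 1 : Nat) : Int) := by push_cast; ring
  simp only [cleanupL, hrf, h01, PySem.Chars.slice_eq_listSlice, PySem.List.slice_from_natCast]
  rw [← List.drop_drop, List.drop_left]
  simp

theorem exists_last_split (c : Char) (l : List Char) (h : c ∈ l) :
    ∃ u v, l = u ++ c :: v ∧ c ∉ v := by
  induction l with
  | nil => simp at h
  | cons a t ih =>
    by_cases hct : c ∈ t
    · obtain ⟨u, v, h1, h2⟩ := ih hct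
      exact ⟨a :: u, v, by simp [h1], h2⟩
    · have hca : c = a := by
        rcases List.mem_cons.mp h with h1 | h1
        · exact h1
        · exact absurd h1 hct
      exact ⟨[], t, by simp [hca], hct⟩

theorem cleanup_append_space (a b : List Char) :
    cleanupL (a ++ ' ' :: b) = cleanupL b := by
  by_cases hb : (' ' : Char) ∈ b
  · obtain ⟨u, v, h1, h2⟩ := exists_last_split ' ' b hb
    subst h1
    rw [show a ++ ' ' :: (u ++ ' ' :: v) = (a ++ ' ' :: u) ++ ' ' :: v by simp]
    rw [cleanup_last _ _ h2, cleanup_last _ _ h2]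
  · rw [cleanup_last _ _ hb, cleanup_no_space _ hb]

theorem takeWhile_take (l : List Char) (c : Char) (j : Nat) (hj : l[j]? = some c)
    (hmin : ∀ i, i < j → l[i]? ≠ some c) :
    l.takeWhile (fun a => !decide (a = c)) = l.take j := by
  induction l generalizing j with
  | nil => simp at hj
  | cons a t ih =>
    cases j with
    | zero =>
      simp at hj
      simp [List.takeWhile_cons, hj]
    | succ j' =>
      have ha : a ≠ c := by
        have := hmin 0 (by omega)
        simpa using this
      simp at hj
      simp [List.takeWhile_cons, ha]
      have := ih j' hj (fun i hi => by simpa using hmin (i + 1) (by omega))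
      simpa using this

theorem takeWhile_all_append (p : Char → Bool) (l₁ l₂ : List Char) (h : ∀ a ∈ l₁, p a) :
    (l₁ ++ l₂).takeWhile p = l₁ ++ l₂.takeWhile p := by
  induction l₁ with
  | nil => simp
  | cons a t ih =>
    simp [List.takeWhile_cons, h a (by simp)]
    exact ih (fun b hb => h b (by simp [hb]))

theorem takeWhile_eq_self_of_not_mem (l : List Char) (c : Char) (h : c ∉ l) :
    l.takeWhile (fun a => !decide (a = c)) = l := by
  rw [List.takeWhile_eq_self_iff]
  intro a ha
  simp
  intro he
  subst he
  exact h ha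

theorem tw_len_lt (l : List Char) (c : Char) (h : c ∈ l) :
    (l.takeWhile (fun a => !decide (a = c))).length < l.length := by
  induction l with
  | nil => simp at h
  | cons a t ih =>
    by_cases hac : a = c
    · simp [List.takeWhile_cons, hac]
    · have hct : c ∈ t := by
        rcases List.mem_cons.mp h with h1 | h1
        · exact absurd h1.symm hac
        · exact h1
      simp only [List.takeWhile_cons]
      simp [hac]
      have := ih hct
      simpa using this

def mk1 (v : List Char) : String := if v = [] then "1" else String.ofList v

def specL (t : List Char) : List String :=
  if h : (t.takeWhile (fun a => !decide (a = 'x'))).length = t.length then []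
  else mk1 (cleanupL (t.takeWhile (fun a => !decide (a = 'x')))) :: specL (t.drop ((t.takeWhile (fun a => !decide (a = 'x'))).length + 1))
termination_by t.length
decreasing_by
  simp only [List.length_drop]
  have hle := (List.takeWhile_prefix (l := t) (p := fun a : Char => !decide (a = 'x'))).length_le
  simp at hle h
  omega

def RL (acc : List Char) : List Char → List String
  | [] => []
  | c :: t =>
    if c = 'x' then (if acc = [] then "1" else String.ofList acc) :: RL [] t
    else if c = ' ' then RL [] t
    else RL (acc ++ [c]) t

theorem ofList_eq_empty_iff (l : List Char) : String.ofList l = "" ↔ l = [] := by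
  constructor
  · intro h
    have := congrArg String.toList h
    simpa using this
  · intro h
    simp [h]

theorem spec_space (acc t : List Char) (hx : 'x' ∉ acc) :
    specL (acc ++ ' ' :: t) = specL t := by
  have hacc : ∀ a ∈ acc ++ [' '], (fun a => !decide (a = 'x')) a = true := by
    intro a ha
    have hne : a ≠ 'x' := by
      intro he
      subst he
      rcases List.mem_append.mp ha with h1 | h1
      · exact hx h1
      · simp at h1
    simp [hne]
  by_cases hxt : 'x' ∈ t
  · have hlt : (t.takeWhile (fun a => !decide (a = 'x'))).length < t.length := tw_len_lt t 'x' hxt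
    have htw : (acc ++ ' ' :: t).takeWhile (fun a => !decide (a = 'x')) =
        acc ++ ' ' :: t.takeWhile (fun a => !decide (a = 'x')) := by
      have := takeWhile_all_append (fun a => !decide (a = 'x')) (acc ++ [' ']) t hacc
      simpa using this
    conv_lhs => rw [specL]
    conv_rhs => rw [specL]
    rw [htw]
    have hne1 : ¬ ((acc ++ ' ' :: t.takeWhile (fun a => !decide (a = 'x'))).length
        = (acc ++ ' ' :: t).length) := by
      simp
      omega
    have hne2 : ¬ ((t.takeWhile (fun a => !decide (a = 'x'))).length = t.length) := by omega
    rw [dif_neg hne1, dif_neg hne2]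
    congr 1
    · rw [cleanup_append_space]
    · have hidx : (acc ++ ' ' :: t.takeWhile (fun a => !decide (a = 'x'))).length + 1 =
          (acc ++ [' ']).length + ((t.takeWhile (fun a => !decide (a = 'x'))).length + 1) := by
        simp
        omega
      rw [hidx, ← List.drop_drop]
      rw [show acc ++ ' ' :: t = (acc ++ [' ']) ++ t by simp]
      rw [List.drop_left]
  · have h1 : 'x' ∉ acc ++ ' ' :: t := by
      simp [hx, hxt]
      try intro h
      try exact absurd h.symm (by decide)
    conv_lhs => rw [specL]
    conv_rhs => rw [specL]
    rw [takeWhile_eq_self_of_not_mem _ _ h1, takeWhile_eq_self_of_not_mem _ _ hxt]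
    simp

theorem spec_eq_RL (t : List Char) : ∀ acc, (' ' : Char) ∉ acc → 'x' ∉ acc →
    specL (acc ++ t) = RL acc t := by
  induction t with
  | nil =>
    intro acc hsp hx
    rw [RL, specL]
    rw [List.append_nil, takeWhile_eq_self_of_not_mem _ _ hx]
    simp
  | cons c t' ih =>
    intro acc hsp hx
    by_cases hc : c = 'x'
    · subst hc
      rw [RL]
      simp only [if_pos rfl]
      have htw : (acc ++ 'x' :: t').takeWhile (fun a => !decide (a = 'x')) = acc := by
        have hall : ∀ a ∈ acc, (fun a => !decide (a = 'x')) a = true := by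
          intro a ha
          have hne : a ≠ 'x' := fun he => hx (he ▸ ha)
          simp [hne]
        have := takeWhile_all_append (fun a => !decide (a = 'x')) acc ('x' :: t') hall
        simpa [List.takeWhile_cons] using this
      conv_lhs => rw [specL]
      rw [htw]
      have hne : ¬ (acc.length = (acc ++ 'x' :: t').length) := by simp
      rw [dif_neg hne]
      congr 1
      · rw [cleanup_no_space _ hsp]
        rfl
      · rw [show acc ++ 'x' :: t' = (acc ++ ['x']) ++ t' by simp,
            show acc.length + 1 = (acc ++ ['x']).length by simp,
            List.drop_left]
        have := ih [] (by simp) (by simp)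
        simpa using this
    · by_cases hs : c = ' '
      · subst hs
        rw [RL]
        simp only [if_neg (by decide : ¬ (' ' = 'x')), if_pos rfl]
        rw [spec_space acc t' hx]
        have := ih [] (by simp) (by simp)
        simpa using this
      · rw [RL]
        simp only [if_neg hc, if_neg hs]
        rw [show acc ++ c :: t' = (acc ++ [c]) ++ t' by simp]
        exact ih (acc ++ [c])
          (by simp [hsp]; intro he; subst he; exact hs rfl)
          (by simp [hx]; intro he; subst he; exact hc rfl)

theorem fold_eq_RL (t : List Char) : ∀ (res : List String) (acc : List Char),
    (t.foldl getMulStep (res, String.ofList acc)).1 = res ++ RL acc t := by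
  induction t with
  | nil => intro res acc; simp [RL]
  | cons c t' ih =>
    intro res acc
    simp only [List.foldl_cons]
    by_cases hc : c = 'x'
    · subst hc
      rw [RL]
      simp [getMulStep, ofList_eq_empty_iff]
      rw [show ("" : String) = String.ofList [] from by decide]
      rw [ih]
      by_cases hacc : acc = [] <;> simp [hacc]
    · by_cases hs : c = ' '
      · subst hs
        rw [RL]
        simp [getMulStep]
        rw [show ("" : String) = String.ofList [] from by decide]
        rw [ih]
      · rw [RL]
        simp [getMulStep, hc, hs]
        have hpush : (String.ofList acc).push c = String.ofList (acc ++ [c]) := by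
          apply String.toList_inj.mp
          simp
        rw [hpush, ih]

theorem loop_eq (p : String) (fuel : Nat) :
    ∀ (ms : List String) (k : Nat), k ≤ p.toList.length → p.toList.length - k < fuel →
    getMulLoop p fuel ms (k : Int) (PySem.Chars.findFrom p.toList ['x'] (k : Int)) =
      ms ++ specL (p.toList.drop k) := by
  induction fuel with
  | zero => intro ms k _ hf; omega
  | succ fuel ihn =>
    intro ms k hk hf
    rw [show getMulLoop p (fuel + 1) ms (k : Int) (PySem.Chars.findFrom p.toList ['x'] (k : Int))
        = if PySem.Chars.findFrom p.toList ['x'] (k : Int) = -1 then ms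
          else
            let multiplier := PySem.Str.slice p (some ((k : Int))) (some (PySem.Chars.findFrom p.toList ['x'] (k : Int)))
            let last_space := PySem.Str.rfind multiplier " "
            let multiplier2 := PySem.Str.slice multiplier (some (last_space + 1)) none
            let multiplier3 := if multiplier2 = "" then "1" else multiplier2
            getMulLoop p fuel (ms ++ [multiplier3]) (PySem.Chars.findFrom p.toList ['x'] (k : Int) + 1)
              (PySem.Str.findFrom p "x" (PySem.Chars.findFrom p.toList ['x'] (k : Int) + 1)) from rfl]
    rw [PySem.Chars.findFrom_natCast p.toList ['x'] k hk]
    by_cases hfind : PySem.Chars.find (p.toList.drop k) ['x'] = -1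
    · rw [if_pos (by rw [hfind]; rfl : (if PySem.Chars.find (p.toList.drop k) ['x'] = -1 then (-1 : Int)
        else (k : Int) + PySem.Chars.find (p.toList.drop k) ['x']) = -1)]
      have hnx : 'x' ∉ p.toList.drop k := by
        intro hmem
        rw [PySem.Chars.find_eq_neg_one_iff] at hfind
        obtain ⟨u, v, huv⟩ := List.append_of_mem hmem
        exact hfind ⟨u, v, by simp [huv]⟩
      rw [specL, takeWhile_eq_self_of_not_mem _ _ hnx]
      simp
    · have h0 : 0 ≤ PySem.Chars.find (p.toList.drop k) ['x'] := by
        have := PySem.Chars.neg_one_le_find (p.toList.drop k) ['x']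
        omega
      set j := (PySem.Chars.find (p.toList.drop k) ['x']).toNat with hj
      have hfj : PySem.Chars.find (p.toList.drop k) ['x'] = (j : Int) :=
        (Int.toNat_of_nonneg h0).symm
      obtain ⟨hpre, hmin⟩ := PySem.Chars.find_spec (s := p.toList.drop k) (sub := ['x']) h0
      have hjx : (p.toList.drop k)[j]? = some 'x' := (single_prefix_drop _ _ _).mp hpre
      have hjlt : j < (p.toList.drop k).length := (List.getElem?_eq_some_iff.mp hjx).1
      rw [if_neg hfind, hfj] at *
      rw [if_neg (by omega : ¬ ((k : Int) + (j : Int) = -1))]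
      have hm1 : (PySem.Str.slice p (some (k : Int)) (some ((k : Int) + (j : Int)))).toList
          = (p.toList.drop k).take j := by
        rw [PySem.Str.toList_slice, PySem.Chars.slice_eq_listSlice]
        exact PySem.List.slice_natCast_add p.toList k j
      have hm2 : (PySem.Str.slice (PySem.Str.slice p (some (k : Int)) (some ((k : Int) + (j : Int))))
          (some (PySem.Str.rfind (PySem.Str.slice p (some (k : Int)) (some ((k : Int) + (j : Int)))) " " + 1)) none).toList
          = cleanupL ((p.toList.drop k).take j) := by
        rw [PySem.Str.toList_slice, PySem.Str.rfind_eq, hm1]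
        rw [show (" " : String).toList = [' '] from by decide]
        rfl
      have hm3 : (if (PySem.Str.slice (PySem.Str.slice p (some (k : Int)) (some ((k : Int) + (j : Int))))
          (some (PySem.Str.rfind (PySem.Str.slice p (some (k : Int)) (some ((k : Int) + (j : Int)))) " " + 1)) none) = ""
          then "1" else (PySem.Str.slice (PySem.Str.slice p (some (k : Int)) (some ((k : Int) + (j : Int))))
          (some (PySem.Str.rfind (PySem.Str.slice p (some (k : Int)) (some ((k : Int) + (j : Int)))) " " + 1)) none))
          = mk1 (cleanupL ((p.toList.drop k).take j)) := by
        unfold mk1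
        by_cases hz : cleanupL ((p.toList.drop k).take j) = []
        · rw [if_pos hz, if_pos (String.toList_inj.mp (by rw [hm2, hz]; decide))]
        · rw [if_neg hz, if_neg (fun hc => hz (by rw [← hm2, hc]; decide))]
          apply String.toList_inj.mp
          rw [hm2]
          simp
      simp only []
      rw [hm3]
      have harg : (k : Int) + (j : Int) + 1 = ((k + j + 1 : Nat) : Int) := by push_cast; ring
      rw [harg]
      rw [show PySem.Str.findFrom p "x" ((k + j + 1 : Nat) : Int)
          = PySem.Chars.findFrom p.toList ['x'] ((k + j + 1 : Nat) : Int) from by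
        rw [PySem.Str.findFrom_eq]; rfl]
      have hdk : (p.toList.drop k).length = p.toList.length - k := List.length_drop
      have hk1 : k + j + 1 ≤ p.toList.length := by omega
      rw [ihn (ms ++ [mk1 (cleanupL ((p.toList.drop k).take j))]) (k + j + 1) hk1 (by omega)]
      conv_rhs => rw [specL]
      have htk : (p.toList.drop k).takeWhile (fun a => !decide (a = 'x')) = (p.toList.drop k).take j := by
        apply takeWhile_take _ _ _ hjx
        intro i hi hci
        exact hmin i (by omega) ((single_prefix_drop _ _ _).mpr hci)
      rw [htk]
      have hjlt' : j < p.toList.length - k := by rwa [List.length_drop] at hjlt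
      have hlen : ((p.toList.drop k).take j).length = j := by
        rw [List.length_take, List.length_drop]
        omega
      rw [dif_neg (by rw [hlen, List.length_drop]; omega :
        ¬ (((p.toList.drop k).take j).length = (p.toList.drop k).length))]
      rw [hlen, List.drop_drop]
      rw [show k + (j + 1) = k + j + 1 from by omega]
      simp

theorem main_eq (p : String) : get_multipliers p = get_multipliers_alt p := by
  unfold get_multipliers get_multipliers_alt
  rw [show PySem.Str.find p "x" = PySem.Chars.findFrom p.toList ['x'] ((0 : Nat) : Int) from by
    rw [PySem.Str.find_eq]
    rw [show ((0 : Nat) : Int) = (0 : Int) from rfl, PySem.Chars.findFrom_zero]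
    rfl]
  have h0 : getMulLoop p (p.toList.length + 1) [] ((0 : Nat) : Int)
        (PySem.Chars.findFrom p.toList ['x'] ((0 : Nat) : Int))
      = [] ++ specL (p.toList.drop 0) := loop_eq p (p.toList.length + 1) [] 0 (by omega) (by omega)
  simp only [Nat.cast_zero] at h0 ⊢
  rw [h0]
  rw [show ("" : String) = String.ofList [] from by decide]
  rw [fold_eq_RL p.toList [] []]
  have := spec_eq_RL p.toList [] (by simp) (by simp)
  simpa using this

-- ===== VERDICT (by name: the statement is the Claim_ definition above) =====
theorem get_multipliers_spec : Claim_equal_get_multipliers := by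
  intro polynomial _
  exact main_eq polynomial
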